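-- pv_equiv track=rewrite | github.com/JwahoonKim/PS | 프로그래머스/[3차] 방금그곡.py | getMusicArr
-- ===== SOURCE A (Python) =====
-- def getMusicArr(musicString, time):
--     result = []
--     for c in musicString:
--         if c == '#':
--             result[-1] += '#'
--         else:
--             result.append(c)
--     if time == 0:
--         return result
--     if len(result) >= time:
--         return result[:time]
--     result = result * (time // len(result)) + result[:time % len(result)]
--     return result
-- ===== SOURCE B (Python) =====
-- def getMusicArr(musicString, time):
--     # Parse by scanning note positions: each note is a character together
--     # with its following run of '#'s, taken as one slice.
--     notes = []
--     i = 0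
--     L = len(musicString)
--     while i < L:
--         j = i + 1
--         while j < L and musicString[j] == '#':
--             j += 1
--         notes.append(musicString[i:j])
--         i = j
--     if time == 0:
--         return notes
--     n = len(notes)
--     if time <= n:
--         return notes[:time]
--     return [notes[i % n] for i in range(time)]
-- ===== Notes on version B (the rewrite author's own statement) =====
-- stated objective: alternative
-- what changed: B parses with a two-pointer scan that slices each note (character plus its '#'-run) directly out of the string instead of A's append-then-mutate-last-element loop, and tiles by indexing the note list with i % n over the output positions instead of A's list-multiplication plus remainder slice.
import Mathlib
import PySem

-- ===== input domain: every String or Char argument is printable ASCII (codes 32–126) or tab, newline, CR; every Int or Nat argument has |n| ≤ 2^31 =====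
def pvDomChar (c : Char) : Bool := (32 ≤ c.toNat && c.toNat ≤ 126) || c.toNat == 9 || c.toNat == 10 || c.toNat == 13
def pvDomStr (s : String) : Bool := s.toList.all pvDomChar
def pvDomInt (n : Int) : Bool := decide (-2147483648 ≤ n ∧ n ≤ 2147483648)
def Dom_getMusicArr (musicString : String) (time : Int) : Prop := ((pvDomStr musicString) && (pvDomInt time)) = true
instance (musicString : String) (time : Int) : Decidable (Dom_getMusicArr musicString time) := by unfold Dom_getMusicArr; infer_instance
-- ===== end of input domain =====

-- B replaces A's append/mutate parse loop by a two-pointer scan that slices each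
-- note (char + its '#'-run) out of the string, and A's list-multiply-and-slice
-- tiling by a single modulo-indexed comprehension over the output positions
-- (objective: alternative decomposition, same cost).
-- Note strings are carried as List Char inside the loops (Lean's own String
-- append/length are kernel-opaque) and packed with String.ofList at the end.

-- ===== PORT A =====
-- the loop body: '#' mutates the last element in place, anything else is appended
def pvStepA (res : List (List Char)) (c : Char) : List (List Char) :=
  if c = '#' then PySem.List.pySetD res (-1) (PySem.List.pyGetD res (-1) [] ++ ['#'])
  else res ++ [[c]]

def getMusicArr (musicString : String) (time : Int) : List String :=
  let result := musicString.toList.foldl pvStepA []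
  if time = 0 then result.map String.ofList
  else if time ≤ PySem.List.len result then
    (PySem.List.slice result none (some time)).map String.ofList
  else
    (PySem.List.pyRepeat result (PySem.Int.floordiv time (PySem.List.len result)) ++
      PySem.List.slice result none (some (PySem.Int.mod time (PySem.List.len result)))).map String.ofList

-- ===== PORT B =====
-- end of the '#'-run starting at j (B's inner while loop)
def pvRunEnd (cs : List Char) (j : Nat) : Nat :=
  if h : j < cs.length then
    if cs[j] = '#' then pvRunEnd cs (j + 1) else j
  else j
termination_by cs.length - j

theorem pvRunEnd_ge (cs : List Char) (j : Nat) : j ≤ pvRunEnd cs j := by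
  rw [pvRunEnd]
  split_ifs with h hc
  · have := pvRunEnd_ge cs (j + 1); omega
  · omega
  · omega
termination_by cs.length - j
decreasing_by omega

-- B's outer while loop: emit the slice [i:j] and continue at j
def pvNotesFrom (cs : List Char) (i : Nat) : List (List Char) :=
  if h : i < cs.length then
    ((cs.drop i).take (pvRunEnd cs (i + 1) - i)) :: pvNotesFrom cs (pvRunEnd cs (i + 1))
  else []
termination_by cs.length - i
decreasing_by have := pvRunEnd_ge cs (i + 1); omega

def getMusicArr_alt (musicString : String) (time : Int) : List String :=
  let notes := pvNotesFrom musicString.toList 0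
  if time = 0 then notes.map String.ofList
  else
    let n := PySem.List.len notes
    if time ≤ n then (PySem.List.slice notes none (some time)).map String.ofList
    else ((PySem.List.pyRange 0 time 1).map
            (fun i => PySem.List.pyGetD notes (PySem.Int.mod i n) [])).map String.ofList

-- ===== PRECONDITION & SPEC =====
-- Pre_ excludes exactly the inputs where A raises: a leading '#' (IndexError on
-- result[-1]) and an empty string with positive time (ZeroDivisionError).
def Pre_getMusicArr (musicString : String) (time : Int) : Prop :=
  musicString.toList.head? ≠ some '#' ∧ (0 < time → musicString.toList ≠ [])
instance (musicString : String) (time : Int) : Decidable (Pre_getMusicArr musicString time) := by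
  unfold Pre_getMusicArr; infer_instance

def pvWitness_getMusicArr : String × Int := ("A#BC", 7)

def Spec_getMusicArr (musicString : String) (time : Int) (out : List String) : Prop := out = getMusicArr_alt musicString time
instance (musicString : String) (time : Int) (out : List String) : Decidable (Spec_getMusicArr musicString time out) := by unfold Spec_getMusicArr; infer_instance

-- ===== CLAIM (what is proved, stated in full; the proofs are below) =====
def Claim_equal_getMusicArr : Prop := ∀ (musicString : String) (time : Int), Dom_getMusicArr musicString time → Pre_getMusicArr musicString time → Spec_getMusicArr musicString time (getMusicArr musicString time)

-- ===== LEMMAS AND PROOFS =====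

-- the common parse result: each group is a character with its following '#'-run
def pvGroups : List Char → List (List Char)
  | [] => []
  | c :: tl => (c :: tl.takeWhile (· = '#')) :: pvGroups (tl.dropWhile (· = '#'))
termination_by cs => cs.length
decreasing_by
  have := List.length_dropWhile_le (fun x => decide (x = '#')) tl
  simp only [List.length_cons]; omega

theorem pvSetD_last {α : Type} (acc : List α) (x v : α) :
    PySem.List.pySetD (acc ++ [x]) (-1) v = acc ++ [v] := by
  simp [PySem.List.pySetD, PySem.List.pySet?, PySem.List.pyIdx?]

theorem pvFoldA_inv (cs : List Char) (acc : List (List Char)) (last : List Char) :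
    List.foldl pvStepA (acc ++ [last]) cs =
      (acc ++ [last ++ cs.takeWhile (· = '#')]) ++ pvGroups (cs.dropWhile (· = '#')) := by
  induction cs generalizing acc last with
  | nil => simp [pvGroups]
  | cons c tl ih =>
    by_cases hc : c = '#'
    · subst hc
      rw [List.foldl_cons]
      have hstep : pvStepA (acc ++ [last]) '#' = acc ++ [last ++ ['#']] := by
        simp [pvStepA, pvSetD_last, PySem.List.pyGetD_neg_one_append_singleton]
      rw [hstep, ih]
      simp
    · rw [List.foldl_cons]
      have hstep : pvStepA (acc ++ [last]) c = (acc ++ [last]) ++ [[c]] := by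
        simp [pvStepA, hc]
      rw [hstep, ih]
      simp [pvGroups, hc]

theorem pvParseA_eq_groups (cs : List Char) (h : cs.head? ≠ some '#') :
    List.foldl pvStepA [] cs = pvGroups cs := by
  cases cs with
  | nil => simp [pvGroups]
  | cons c tl =>
    have hc : c ≠ '#' := by simpa using h
    rw [List.foldl_cons]
    have hstep : pvStepA [] c = [] ++ [[c]] := by simp [pvStepA, hc]
    rw [hstep, pvFoldA_inv]
    simp [pvGroups]

theorem pvRunEnd_eq (cs : List Char) (j : Nat) :
    pvRunEnd cs j = j + ((cs.drop j).takeWhile (· = '#')).length := by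
  rw [pvRunEnd]
  split_ifs with h hc
  · rw [pvRunEnd_eq cs (j + 1), ← List.getElem_cons_drop h]
    simp only [List.takeWhile_cons, hc, decide_true, if_true, List.length_cons]
    omega
  · rw [← List.getElem_cons_drop h]
    simp [hc]
  · have hnil : cs.drop j = [] := List.drop_eq_nil_of_le (by omega)
    simp [hnil]
termination_by cs.length - j
decreasing_by omega

theorem pvNotesFrom_eq_groups (cs : List Char) (i : Nat) :
    pvNotesFrom cs i = pvGroups (cs.drop i) := by
  rw [pvNotesFrom]
  split_ifs with h
  · have hrun := pvRunEnd_eq cs (i + 1)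
    have hge := pvRunEnd_ge cs (i + 1)
    rw [pvNotesFrom_eq_groups cs (pvRunEnd cs (i + 1))]
    rw [← List.getElem_cons_drop h, pvGroups]
    congr 1
    · have ht : pvRunEnd cs (i + 1) - i
          = ((cs.drop (i + 1)).takeWhile (· = '#')).length + 1 := by omega
      rw [ht, List.take_succ_cons]
      congr 1
      exact (List.prefix_iff_eq_take.mp (List.takeWhile_prefix _)).symm
    · congr 1
      rw [hrun, ← List.drop_drop]
      calc List.drop ((cs.drop (i + 1)).takeWhile (· = '#')).length (cs.drop (i + 1))
          = List.drop ((cs.drop (i + 1)).takeWhile (· = '#')).length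
              ((cs.drop (i + 1)).takeWhile (· = '#') ++ (cs.drop (i + 1)).dropWhile (· = '#')) := by
            rw [List.takeWhile_append_dropWhile]
        _ = (cs.drop (i + 1)).dropWhile (· = '#') := List.drop_left
  · have hnil : cs.drop i = [] := List.drop_eq_nil_of_le (by omega)
    simp [hnil, pvGroups]
termination_by cs.length - i
decreasing_by have := pvRunEnd_ge cs (i + 1); omega

theorem pvMapRange_take {α : Type} (r : List α) (d : α) (t : Nat) (ht : t ≤ r.length) :
    (List.range t).map (fun j => r.getD j d) = r.take t := by
  apply List.ext_getElem
  · simp [ht]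
  · intro k h1 h2
    have hk : k < t := by simpa using h1
    have hkr : k < r.length := by omega
    simp [List.getElem_take, List.getElem?_eq_getElem hkr]

theorem pvChunk {α : Type} (r : List α) (d : α) (n a t : Int)
    (hn : n = r.length) (hp : 0 < n) (hd : n ∣ a) (h0 : 0 ≤ t) (htn : t ≤ n) :
    (PySem.List.pyRange a (a + t) 1).map (fun i => PySem.List.pyGetD r (PySem.Int.mod i n) d) =
      r.take t.toNat := by
  obtain ⟨q, rfl⟩ := hd
  rw [PySem.List.pyRange_one]
  have hsub : (n * q + t - n * q).toNat = t.toNat := by omega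
  rw [List.map_map, hsub]
  have hcong : ∀ k ∈ List.range t.toNat,
      ((fun i => PySem.List.pyGetD r (PySem.Int.mod i n) d) ∘ fun k : Nat => n * q + ↑k) k
        = r.getD k d := by
    intro k hk
    have hk' : (k : Int) < n := by
      have := List.mem_range.mp hk; omega
    simp only [Function.comp]
    rw [PySem.Int.mod_eq_emod_of_pos hp]
    rw [show (n * q + (k : Int)) = (k : Int) + n * q by ring, Int.add_mul_emod_self_left]
    rw [Int.emod_eq_of_lt (by omega) hk']
    simp
  rw [List.map_congr_left hcong]
  exact pvMapRange_take r d t.toNat (by omega)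

theorem pvTileFull {α : Type} (r : List α) (d : α) (n : Int) (hn : n = r.length) (hp : 0 < n)
    (k : Nat) :
    (PySem.List.pyRange 0 (n * k) 1).map (fun i => PySem.List.pyGetD r (PySem.Int.mod i n) d) =
      (List.replicate k r).flatten := by
  induction k with
  | zero => simp
  | succ k ih =>
    have h1 : (0:Int) ≤ n * k := by positivity
    have h2 : (n * ((k:Int) + 1)) = n * k + n := by ring
    rw [Nat.cast_add, Nat.cast_one, h2,
      PySem.List.pyRange_one_append 0 (n * k) (n * k + n) h1 (by omega),
      List.map_append, ih,
      show (n * (k:Int) + n) = n * k + n by ring,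
      pvChunk r d n (n * k) n hn hp ⟨k, rfl⟩ (le_of_lt hp) le_rfl,
      List.replicate_succ', List.flatten_append]
    have : n.toNat = r.length := by omega
    simp [this]

theorem pvTile {α : Type} (r : List α) (d : α) (time : Int) (n : Int)
    (hn : n = r.length) (hp : 0 < n) (ht : n < time) :
    (PySem.List.pyRange 0 time 1).map (fun i => PySem.List.pyGetD r (PySem.Int.mod i n) d) =
      PySem.List.pyRepeat r (PySem.Int.floordiv time n) ++
        PySem.List.slice r none (some (PySem.Int.mod time n)) := by
  have hqm := PySem.Int.floordiv_mul_add_mod time n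
  have hm0 : 0 ≤ PySem.Int.mod time n := PySem.Int.mod_nonneg time hp
  have hmn : PySem.Int.mod time n < n := PySem.Int.mod_lt time hp
  set q := PySem.Int.floordiv time n with hq
  set m := PySem.Int.mod time n with hm
  have hq1 : 1 ≤ q := by nlinarith
  have hnq0 : (0:Int) ≤ n * q := by positivity
  have hnqt : n * q ≤ time := by linarith [hqm, hm0, mul_comm n q]
  rw [PySem.List.pyRange_one_append 0 (n * q) time hnq0 hnqt, List.map_append]
  have hqcast : ((q.toNat : Int)) = q := Int.toNat_of_nonneg (by omega)
  rw [show n * q = n * (q.toNat : Int) by rw [hqcast],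
    pvTileFull r d n hn hp q.toNat]
  rw [show time = n * (q.toNat : Int) + m by rw [hqcast]; linarith [hqm, mul_comm n q]]
  rw [pvChunk r d n (n * (q.toNat : Int)) m hn hp ⟨(q.toNat : Int), rfl⟩ hm0 (le_of_lt hmn)]
  rw [PySem.List.slice_to r hm0]
  rfl

-- ===== VERDICT (by name: the statement is the Claim_ definition above) =====
theorem getMusicArr_spec : Claim_equal_getMusicArr := by
  intro s time _ hpre
  unfold Spec_getMusicArr getMusicArr getMusicArr_alt
  have hparse : List.foldl pvStepA [] s.toList = pvNotesFrom s.toList 0 := by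
    rw [pvParseA_eq_groups s.toList hpre.1, pvNotesFrom_eq_groups, List.drop_zero]
  rw [hparse]
  set r := pvNotesFrom s.toList 0 with hr
  by_cases h0 : time = 0
  · simp [h0]
  · simp only [h0, if_false, PySem.List.len_eq]
    by_cases hle : time ≤ (r.length : Int)
    · simp only [if_pos hle]
    · simp only [if_neg hle]
      have hgr : r = pvGroups s.toList := by rw [hr, pvNotesFrom_eq_groups, List.drop_zero]
      have hne : s.toList ≠ [] := hpre.2 (by omega)
      obtain ⟨c, tl, hcs⟩ := List.exists_cons_of_ne_nil hne
      have hrne : r ≠ [] := by rw [hgr, hcs, pvGroups]; exact List.cons_ne_nil _ _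
      have hpos : (0:Int) < r.length := by
        have := List.length_pos_of_ne_nil hrne; omega
      rw [pvTile r [] time (r.length : Int) rfl hpos (by omega)]
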